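-- pv_equiv track=rewrite | github.com/kvdivyansi/Audion-Playlist_analyser | a_udion.py | detect_mood
-- ===== SOURCE A (Python) =====
-- MOOD_KEYWORDS = {
--     "Happy": ["happy", "joy", "sun", "sunshine", "smile", "bright", "good", "fun", "dance", "party", "better", "alive", "smiling", "golden"],
--     "Sad": ["sad", "lonely", "cry", "tears", "heartbreak", "broken", "miss", "lost", "blue", "alone"],
--     "Energetic": ["fire", "power", "wild", "run", "loud", "fast", "hype", "energy", "rock", "boom", "beat", "crazy"],
--     "Calm": ["calm", "soft", "slow", "chill", "lofi", "peace", "relax", "quiet", "soothing", "sleep"],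
--     "Romantic": ["love", "lover", "heart", "kiss", "romantic", "baby", "sweet", "darling", "mine", "forever"]
-- }
--
-- GENRE_MOOD = {
--     "lofi": "Calm", "lo-fi": "Calm", "lo fi": "Calm", "indie": "Calm",
--     "romantic": "Romantic", "pop": "Happy", "sad": "Sad", "classical": "Calm",
--     "edm": "Energetic", "dance": "Energetic", "rock": "Energetic",
--     "r&b": "Romantic", "soul": "Romantic"
-- }
--
-- def detect_mood(title, genre):
--     title = str(title or "").lower()
--     genre = str(genre or "").lower()
--     for g in GENRE_MOOD:
--         if g in genre:
--             return GENRE_MOOD[g]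
--     for mood, words in MOOD_KEYWORDS.items():
--         for w in words:
--             if w in title:
--                 return mood
--     return "Unknown"
-- ===== SOURCE B (Python) =====
-- # B: inverted index -- exact-substring dict lookups at every text position with a
-- # min-priority accumulator, instead of A's per-keyword substring scans over the tables.
--
-- # the two keyword tables as flat ordered (keyword, mood) lists
-- GENRE_PAIRS = [
--     ("lofi", "Calm"), ("lo-fi", "Calm"), ("lo fi", "Calm"), ("indie", "Calm"),
--     ("romantic", "Romantic"), ("pop", "Happy"), ("sad", "Sad"), ("classical", "Calm"),
--     ("edm", "Energetic"), ("dance", "Energetic"), ("rock", "Energetic"), ("r&b", "Romantic"),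
--     ("soul", "Romantic")
-- ]
--
-- MOOD_PAIRS = [
--     ("happy", "Happy"), ("joy", "Happy"), ("sun", "Happy"), ("sunshine", "Happy"),
--     ("smile", "Happy"), ("bright", "Happy"), ("good", "Happy"), ("fun", "Happy"),
--     ("dance", "Happy"), ("party", "Happy"), ("better", "Happy"), ("alive", "Happy"),
--     ("smiling", "Happy"), ("golden", "Happy"), ("sad", "Sad"), ("lonely", "Sad"),
--     ("cry", "Sad"), ("tears", "Sad"), ("heartbreak", "Sad"), ("broken", "Sad"),
--     ("miss", "Sad"), ("lost", "Sad"), ("blue", "Sad"), ("alone", "Sad"),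
--     ("fire", "Energetic"), ("power", "Energetic"), ("wild", "Energetic"),
--     ("run", "Energetic"), ("loud", "Energetic"), ("fast", "Energetic"), ("hype", "Energetic"),
--     ("energy", "Energetic"), ("rock", "Energetic"), ("boom", "Energetic"),
--     ("beat", "Energetic"), ("crazy", "Energetic"), ("calm", "Calm"), ("soft", "Calm"),
--     ("slow", "Calm"), ("chill", "Calm"), ("lofi", "Calm"), ("peace", "Calm"),
--     ("relax", "Calm"), ("quiet", "Calm"), ("soothing", "Calm"), ("sleep", "Calm"),
--     ("love", "Romantic"), ("lover", "Romantic"), ("heart", "Romantic"), ("kiss", "Romantic"),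
--     ("romantic", "Romantic"), ("baby", "Romantic"), ("sweet", "Romantic"),
--     ("darling", "Romantic"), ("mine", "Romantic"), ("forever", "Romantic")
-- ]
--
--
-- def _index(pairs):
--     # keyword -> (priority, mood); keywords in each table are distinct
--     return {kw: (pri, mood) for pri, (kw, mood) in enumerate(pairs)}
--
--
-- GENRE_INDEX = _index(GENRE_PAIRS)
-- MOOD_INDEX = _index(MOOD_PAIRS)
-- GENRE_LENS = sorted({len(kw) for kw, _ in GENRE_PAIRS})
-- MOOD_LENS = sorted({len(kw) for kw, _ in MOOD_PAIRS})
--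
--
-- def _best(text, index, lens):
--     # (priority, mood) of the minimum-priority keyword occurring in text, else None:
--     # every substring of text whose length is a keyword length is looked up exactly.
--     best = None
--     for j in range(len(text)):
--         for L in lens:
--             hit = index.get(text[j:j + L])
--             if hit is not None and (best is None or hit[0] < best[0]):
--                 best = hit
--     return best
--
--
-- def detect_mood(title, genre):
--     title = str(title or "").lower()
--     genre = str(genre or "").lower()
--     hit = _best(genre, GENRE_INDEX, GENRE_LENS) or _best(title, MOOD_INDEX, MOOD_LENS)
--     return hit[1] if hit else "Unknown"
-- ===== Notes on version B (the rewrite author's own statement) =====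
-- stated objective: alternative
-- what changed: Replaces A's per-keyword substring scans (dict-key loop plus nested mood/word loops with early return) by an inverted index: every substring of the text whose length is a keyword length is looked up exactly in a keyword->(priority,mood) dict and the minimum-priority hit wins.
import Mathlib
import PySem

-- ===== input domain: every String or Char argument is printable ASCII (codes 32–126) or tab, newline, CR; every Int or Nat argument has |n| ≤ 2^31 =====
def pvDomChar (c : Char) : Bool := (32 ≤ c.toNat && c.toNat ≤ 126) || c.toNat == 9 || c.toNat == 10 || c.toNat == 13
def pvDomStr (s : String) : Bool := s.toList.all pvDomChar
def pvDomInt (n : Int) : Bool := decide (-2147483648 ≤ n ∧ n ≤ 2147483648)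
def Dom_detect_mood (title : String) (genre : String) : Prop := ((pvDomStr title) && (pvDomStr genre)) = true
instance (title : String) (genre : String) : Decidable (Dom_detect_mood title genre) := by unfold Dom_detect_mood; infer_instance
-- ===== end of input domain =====

-- B replaces A's per-keyword substring scans by an inverted index: every substring of
-- the text whose length is a keyword length is looked up in a keyword -> (priority,
-- mood) dict and the minimum-priority hit wins; objective: alternative algorithm.

-- ===== PORT A =====
def MOOD_KEYWORDS : List (String × List String) := [
  ("Happy", ["happy", "joy", "sun", "sunshine", "smile", "bright", "good", "fun", "dance", "party", "better", "alive", "smiling", "golden"]),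
  ("Sad", ["sad", "lonely", "cry", "tears", "heartbreak", "broken", "miss", "lost", "blue", "alone"]),
  ("Energetic", ["fire", "power", "wild", "run", "loud", "fast", "hype", "energy", "rock", "boom", "beat", "crazy"]),
  ("Calm", ["calm", "soft", "slow", "chill", "lofi", "peace", "relax", "quiet", "soothing", "sleep"]),
  ("Romantic", ["love", "lover", "heart", "kiss", "romantic", "baby", "sweet", "darling", "mine", "forever"])]

def GENRE_MOOD : PySem.Dict String String := PySem.Dict.ofList [
  ("lofi", "Calm"), ("lo-fi", "Calm"), ("lo fi", "Calm"), ("indie", "Calm"),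
  ("romantic", "Romantic"), ("pop", "Happy"), ("sad", "Sad"), ("classical", "Calm"),
  ("edm", "Energetic"), ("dance", "Energetic"), ("rock", "Energetic"),
  ("r&b", "Romantic"), ("soul", "Romantic")]

-- 'for g in GENRE_MOOD: if g in genre: return GENRE_MOOD[g]'
def loopGenre (ks : List String) (genre : String) : Option String :=
  match ks with
  | [] => none
  | g :: rest => if PySem.Str.isIn g genre then GENRE_MOOD.get? g else loopGenre rest genre

-- inner 'for w in words: if w in title: return mood'
def loopWords (ws : List String) (title mood : String) : Option String :=
  match ws with
  | [] => none
  | w :: rest => if PySem.Str.isIn w title then some mood else loopWords rest title mood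

-- 'for mood, words in MOOD_KEYWORDS.items(): …'
def loopMoods (items : List (String × List String)) (title : String) : Option String :=
  match items with
  | [] => none
  | (mood, ws) :: rest =>
    match loopWords ws title mood with
    | some m => some m
    | none => loopMoods rest title

def detect_mood (title : String) (genre : String) : String :=
  let title := PySem.Str.lower title   -- str(title or "") is title itself for a string argument
  let genre := PySem.Str.lower genre
  match loopGenre GENRE_MOOD.keys genre with
  | some m => m
  | none =>
    match loopMoods MOOD_KEYWORDS title with
    | some m => m
    | none => "Unknown"

-- ===== PORT B =====
-- Source B's flat ordered (keyword, mood) genre table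
def GENRE_PAIRS : List (String × String) := [
  ("lofi", "Calm"), ("lo-fi", "Calm"), ("lo fi", "Calm"), ("indie", "Calm"),
  ("romantic", "Romantic"), ("pop", "Happy"), ("sad", "Sad"), ("classical", "Calm"),
  ("edm", "Energetic"), ("dance", "Energetic"), ("rock", "Energetic"),
  ("r&b", "Romantic"), ("soul", "Romantic")]

-- Source B's flat ordered (keyword, mood) mood table
def MOOD_PAIRS : List (String × String) := [
  ("happy", "Happy"), ("joy", "Happy"), ("sun", "Happy"), ("sunshine", "Happy"),
  ("smile", "Happy"), ("bright", "Happy"), ("good", "Happy"), ("fun", "Happy"),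
  ("dance", "Happy"), ("party", "Happy"), ("better", "Happy"), ("alive", "Happy"),
  ("smiling", "Happy"), ("golden", "Happy"), ("sad", "Sad"), ("lonely", "Sad"),
  ("cry", "Sad"), ("tears", "Sad"), ("heartbreak", "Sad"), ("broken", "Sad"), ("miss", "Sad"),
  ("lost", "Sad"), ("blue", "Sad"), ("alone", "Sad"), ("fire", "Energetic"),
  ("power", "Energetic"), ("wild", "Energetic"), ("run", "Energetic"), ("loud", "Energetic"),
  ("fast", "Energetic"), ("hype", "Energetic"), ("energy", "Energetic"),
  ("rock", "Energetic"), ("boom", "Energetic"), ("beat", "Energetic"), ("crazy", "Energetic"),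
  ("calm", "Calm"), ("soft", "Calm"), ("slow", "Calm"), ("chill", "Calm"), ("lofi", "Calm"),
  ("peace", "Calm"), ("relax", "Calm"), ("quiet", "Calm"), ("soothing", "Calm"),
  ("sleep", "Calm"), ("love", "Romantic"), ("lover", "Romantic"), ("heart", "Romantic"),
  ("kiss", "Romantic"), ("romantic", "Romantic"), ("baby", "Romantic"), ("sweet", "Romantic"),
  ("darling", "Romantic"), ("mine", "Romantic"), ("forever", "Romantic")]

-- _index(pairs): {kw: (pri, mood) for pri, (kw, mood) in enumerate(pairs)}
def mkIndex (ps : List (String × String)) : PySem.Dict String (Int × String) :=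
  PySem.Dict.ofList ((PySem.List.enumerate ps).map (fun x => (x.2.1, (x.1, x.2.2))))

def GENRE_INDEX : PySem.Dict String (Int × String) := mkIndex GENRE_PAIRS
def MOOD_INDEX : PySem.Dict String (Int × String) := mkIndex MOOD_PAIRS

-- sorted({len(kw) for kw, _ in pairs})
def lensOf (ps : List (String × String)) : List Int :=
  PySem.List.sorted (PySem.Set.ofList (ps.map (fun p => PySem.Str.len p.1))) (fun x => x) false

def GENRE_LENS : List Int := lensOf GENRE_PAIRS
def MOOD_LENS : List Int := lensOf MOOD_PAIRS

-- inner loop body of _best: look up text[j:j+L]; keep the smaller-priority hit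
def bestAt (index : PySem.Dict String (Int × String)) (text : String) (j : Int)
    (b : Option (Int × String)) (L : Int) : Option (Int × String) :=
  match index.get? (PySem.Str.slice text (some j) (some (j + L))) with
  | none => b
  | some hit =>
    match b with
    | none => some hit
    | some bb => if hit.1 < bb.1 then some hit else some bb

-- _best(text, index, lens)
def best (text : String) (index : PySem.Dict String (Int × String))
    (lens : List Int) : Option (Int × String) :=
  (PySem.List.pyRange 0 (PySem.Str.len text) 1).foldl
    (fun b j => lens.foldl (bestAt index text j) b) none

def detect_mood_alt (title : String) (genre : String) : String :=
  let title := PySem.Str.lower title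
  let genre := PySem.Str.lower genre
  match (best genre GENRE_INDEX GENRE_LENS).orElse
      (fun _ => best title MOOD_INDEX MOOD_LENS) with
  | some hit => hit.2
  | none => "Unknown"

-- ===== PRECONDITION & SPEC =====
def Spec_detect_mood (title : String) (genre : String) (out : String) : Prop := out = detect_mood_alt title genre
instance (title : String) (genre : String) (out : String) : Decidable (Spec_detect_mood title genre out) := by unfold Spec_detect_mood; infer_instance

-- ===== CLAIM (what is proved, stated in full; the proofs are below) =====
def Claim_equal_detect_mood : Prop := ∀ (title : String) (genre : String), Dom_detect_mood title genre → Spec_detect_mood title genre (detect_mood title genre)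

-- ===== LEMMAS AND PROOFS =====

-- first (priority, mood) of a table entry whose keyword occurs in text
def firstEnum (text : String) (ps : List (String × String)) (s : Int) : Option (Int × String) :=
  (PySem.List.enumerate ps s).findSome?
    (fun x => if PySem.Str.isIn x.2.1 text then some (x.1, x.2.2) else none)

def firstMatch (text : String) (pairs : List (String × String)) : Option String :=
  pairs.findSome? (fun p => if PySem.Str.isIn p.1 text then some p.2 else none)

-- the min-priority accumulator step of _best
def pickMin (b : Option (Int × String)) (h : Int × String) : Option (Int × String) :=
  match b with
  | none => some h
  | some bb => if h.1 < bb.1 then some h else some bb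

-- all hits produced by the two nested loops of _best, as one list
def hitsOf (text : String) (ps : List (String × String)) : List (Int × String) :=
  (PySem.List.pyRange 0 (PySem.Str.len text) 1).flatMap (fun j =>
    (lensOf ps).filterMap (fun L =>
      (mkIndex ps).get? (PySem.Str.slice text (some j) (some (j + L)))))

theorem map_fst_f_enumerate (ps : List (String × String)) (s : Int) :
    ((PySem.List.enumerate ps s).map (fun x => (x.2.1, (x.1, x.2.2)))).map (fun p => p.1)
      = ps.map (fun p => p.1) := by
  induction ps generalizing s with
  | nil => rfl
  | cons p t ih => simp only [PySem.List.enumerate_cons, List.map_cons, ih]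

theorem items_mkIndex (ps : List (String × String)) (hN : (ps.map (·.1)).Nodup) :
    (mkIndex ps).items = (PySem.List.enumerate ps).map (fun x => (x.2.1, (x.1, x.2.2))) := by
  have h := PySem.Dict.items_foldl_insert_fresh
    ((PySem.List.enumerate ps).map (fun x => (x.2.1, (x.1, x.2.2))))
    (fun p => p.1) (fun p => p.2) PySem.Dict.empty
    (fun a _ => rfl)
    (by rw [map_fst_f_enumerate]; exact hN)
  have h2 : (mkIndex ps).items
      = PySem.Dict.empty.items
        ++ ((PySem.List.enumerate ps).map (fun x => (x.2.1, (x.1, x.2.2)))).map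
             (fun a => (a.1, a.2)) := h
  simpa using h2

theorem keys_mkIndex_nodup (ps : List (String × String)) (hN : (ps.map (·.1)).Nodup) :
    (mkIndex ps).keys.Nodup := by
  show ((mkIndex ps).items.map (fun p => p.1)).Nodup
  rw [items_mkIndex ps hN, map_fst_f_enumerate]
  exact hN

theorem get?_mkIndex (ps : List (String × String)) (hN : (ps.map (·.1)).Nodup)
    (s : String) (h : Int × String) :
    (mkIndex ps).get? s = some h ↔
      ∃ (k : Nat) (hk : k < ps.length), s = ps[k].1 ∧ h = ((k : Int), ps[k].2) := by
  rw [PySem.Dict.get?_eq_some_iff_mem_items _ _ _ (keys_mkIndex_nodup ps hN),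
    items_mkIndex ps hN]
  simp only [List.mem_map, PySem.List.mem_enumerate_iff]
  constructor
  · rintro ⟨x, ⟨k, hk, rfl⟩, hx⟩
    refine ⟨k, hk, ?_, ?_⟩ <;> simp_all [Prod.ext_iff]
  · rintro ⟨k, hk, rfl, rfl⟩
    exact ⟨((0 : Int) + k, ps[k]), ⟨k, hk, rfl⟩, by simp⟩

theorem mem_lensOf (ps : List (String × String)) (L : Int) :
    L ∈ lensOf ps ↔ ∃ p ∈ ps, L = PySem.Str.len p.1 := by
  unfold lensOf
  rw [PySem.List.mem_sorted]
  simp only [PySem.Set.mem_ofList, List.mem_map]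
  constructor
  · rintro ⟨p, hp, rfl⟩; exact ⟨p, hp, rfl⟩
  · rintro ⟨p, hp, rfl⟩; exact ⟨p, hp, rfl⟩

theorem len_nonneg (q : String) : 0 ≤ PySem.Str.len q := by
  simp [PySem.Str.len]

theorem mem_hitsOf (ps : List (String × String)) (hN : (ps.map (·.1)).Nodup)
    (hE : ∀ p ∈ ps, p.1 ≠ "") (text : String) (h : Int × String) :
    h ∈ hitsOf text ps ↔
      ∃ (k : Nat) (hk : k < ps.length),
        PySem.Str.isIn ps[k].1 text = true ∧ h = ((k : Int), ps[k].2) := by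
  unfold hitsOf
  simp only [List.mem_flatMap, List.mem_filterMap]
  constructor
  · rintro ⟨j, hj, L, hL, hget⟩
    rw [PySem.List.mem_pyRange_one] at hj
    obtain ⟨k, hk, hs, rfl⟩ := (get?_mkIndex ps hN _ _).mp hget
    obtain ⟨q, _, rfl⟩ := (mem_lensOf ps L).mp hL
    refine ⟨k, hk, ?_, rfl⟩
    rw [← hs, PySem.Str.isIn_eq]
    rw [PySem.Chars.isIn_iff_infix]
    simp only [PySem.Str.toList_slice, PySem.Chars.slice_eq_listSlice]
    have hL0 : (0 : Int) ≤ PySem.Str.len q.1 := len_nonneg q.1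
    rw [PySem.List.slice_toNat _ hj.1 (by omega)]
    exact ((List.take_prefix _ _).isInfix).trans ((List.drop_suffix _ _).isInfix)
  · rintro ⟨k, hk, hin, rfl⟩
    rw [PySem.Str.isIn_eq] at hin
    obtain ⟨j, hpre⟩ := (PySem.Chars.exists_prefix_drop_iff_isIn _ _).mpr hin
    have hkey_ne : ps[k].1 ≠ "" := hE _ (List.getElem_mem hk)
    have hkl : ps[k].1.toList ≠ [] := by
      intro h0
      exact hkey_ne (String.ext (by simp [h0]))
    have hdrop_ne : text.toList.drop j ≠ [] := by
      intro h0; rw [h0] at hpre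
      exact hkl (List.prefix_nil.mp hpre)
    have hjlt : j < text.toList.length := by
      by_contra hge; push Not at hge
      exact hdrop_ne (List.drop_eq_nil_iff.mpr (by omega))
    refine ⟨(j : Int), ?_, PySem.Str.len ps[k].1, ?_, ?_⟩
    · rw [PySem.List.mem_pyRange_one]
      refine ⟨by omega, ?_⟩
      simp only [PySem.Str.len]
      exact_mod_cast hjlt
    · exact (mem_lensOf ps _).mpr ⟨ps[k], List.getElem_mem hk, rfl⟩
    · rw [get?_mkIndex ps hN]
      refine ⟨k, hk, ?_, rfl⟩
      refine (String.ext ?_).symm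
      simp only [PySem.Str.toList_slice, PySem.Chars.slice_eq_listSlice]
      have hL0 : (0 : Int) ≤ PySem.Str.len ps[k].1 := len_nonneg ps[k].1
      rw [PySem.List.slice_toNat _ (by omega) (by omega)]
      have hlen : ((j : Int) + PySem.Str.len ps[k].1).toNat - ((j : Int)).toNat
          = ps[k].1.toList.length := by
        simp only [PySem.Str.len] at hL0 ⊢
        omega
      rw [hlen, Int.toNat_natCast]
      exact List.prefix_iff_eq_take.mp hpre

theorem foldl_optStep {α H B : Type} (f : α → Option H) (g : B → H → B)
    (l : List α) (b : B) :
    l.foldl (fun b x => match f x with | none => b | some h => g b h) b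
      = (l.filterMap f).foldl g b := by
  induction l generalizing b with
  | nil => rfl
  | cons x t ih =>
    simp only [List.foldl_cons, List.filterMap_cons]
    cases f x <;> simp [ih]

theorem foldl_foldl_flatMap {α H B : Type} (g : B → H → B) (F : α → List H)
    (js : List α) (b : B) :
    js.foldl (fun b j => (F j).foldl g b) b = (js.flatMap F).foldl g b := by
  induction js generalizing b with
  | nil => rfl
  | cons j t ih => simp [List.flatMap_cons, List.foldl_append, ih]

theorem best_eq_foldl_hits (text : String) (ps : List (String × String)) :
    best text (mkIndex ps) (lensOf ps) = (hitsOf text ps).foldl pickMin none := by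
  unfold best hitsOf
  rw [← foldl_foldl_flatMap]
  refine PySem.List.foldl_congr_mem _ _ _ _ ?_
  intro acc j _
  rw [← foldl_optStep
    (fun L => (mkIndex ps).get? (PySem.Str.slice text (some j) (some (j + L))))
    pickMin (lensOf ps) acc]
  refine PySem.List.foldl_congr_mem _ _ _ _ ?_
  intro acc2 L _
  cases hx : (mkIndex ps).get? (PySem.Str.slice text (some j) (some (j + L))) with
  | none => simp [bestAt, hx]
  | some hit => cases acc2 <;> simp [bestAt, pickMin, hx]

theorem foldl_pickMin_some_spec (hs : List (Int × String)) (b : Int × String) :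
    ∃ r, hs.foldl pickMin (some b) = some r ∧ r ∈ b :: hs ∧ ∀ x ∈ b :: hs, r.1 ≤ x.1 := by
  induction hs generalizing b with
  | nil =>
    refine ⟨b, rfl, List.mem_cons_self, ?_⟩
    intro x hx
    simp only [List.mem_cons, List.not_mem_nil, or_false] at hx
    subst hx; exact le_refl _
  | cons h t ih =>
    simp only [List.foldl_cons]
    have hstep : pickMin (some b) h = some (if h.1 < b.1 then h else b) := by
      by_cases hlt : h.1 < b.1 <;> simp [pickMin, hlt]
    obtain ⟨r, hr, hmem, hmin⟩ := ih (if h.1 < b.1 then h else b)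
    refine ⟨r, by rw [hstep]; exact hr, ?_, ?_⟩
    · rcases List.mem_cons.mp hmem with rfl | hmem2
      · by_cases hlt : h.1 < b.1 <;> simp [hlt]
      · simp [hmem2]
    · intro x hx
      have hrb' : r.1 ≤ (if h.1 < b.1 then h else b).1 := hmin _ List.mem_cons_self
      have hb'b : (if h.1 < b.1 then h else b).1 ≤ b.1 ∧ (if h.1 < b.1 then h else b).1 ≤ h.1 := by
        by_cases hlt : h.1 < b.1 <;> simp [hlt] <;> omega
      rw [List.mem_cons, List.mem_cons] at hx
      rcases hx with rfl | rfl | hx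
      · omega
      · omega
      · exact hmin x (List.mem_cons_of_mem _ hx)

theorem firstEnum_eq_some (text : String) (ps : List (String × String)) (s : Int)
    (k : Nat) (hk : k < ps.length)
    (hmatch : PySem.Str.isIn ps[k].1 text = true)
    (hmin : ∀ k' (hk' : k' < ps.length), k' < k → PySem.Str.isIn ps[k'].1 text = false) :
    firstEnum text ps s = some (s + k, ps[k].2) := by
  induction ps generalizing s k with
  | nil => exact absurd hk (by simp)
  | cons p t ih =>
    unfold firstEnum
    rw [PySem.List.enumerate_cons, List.findSome?_cons]
    cases k with
    | zero =>
      simp only [List.getElem_cons_zero] at hmatch ⊢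
      rw [if_pos hmatch]
      simp
    | succ k =>
      have h0 : PySem.Str.isIn p.1 text = false := hmin 0 (by omega) (by omega)
      simp only [h0, Bool.false_eq_true, if_false]
      have := ih (s + 1) k (by simpa using Nat.lt_of_succ_lt_succ hk)
        (by simpa using hmatch)
        (fun k' hk' hlt => by simpa using hmin (k' + 1) (by omega) (by omega))
      rw [show firstEnum text t (s + 1)
          = (PySem.List.enumerate t (s + 1)).findSome?
              (fun x => if PySem.Str.isIn x.2.1 text then some (x.1, x.2.2) else none) from rfl] at this
      rw [this]
      simp only [List.getElem_cons_succ]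
      congr 2
      push_cast
      ring

theorem best_eq_firstEnum (text : String) (ps : List (String × String))
    (hN : (ps.map (·.1)).Nodup) (hE : ∀ p ∈ ps, p.1 ≠ "") :
    best text (mkIndex ps) (lensOf ps) = firstEnum text ps 0 := by
  rw [best_eq_foldl_hits]
  by_cases hex : ∃ k, ∃ _ : k < ps.length, PySem.Str.isIn ps[k].1 text = true
  · classical
    let k₀ := Nat.find hex
    obtain ⟨hk₀, hm₀⟩ := Nat.find_spec hex
    have hmin₀ : ∀ k' (hk' : k' < ps.length), k' < k₀ → PySem.Str.isIn ps[k'].1 text = false := by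
      intro k' hk' hlt
      have hnm := Nat.find_min hex hlt
      simp only [not_exists] at hnm
      simpa using hnm hk'
    have h1 : firstEnum text ps 0 = some ((k₀ : Int), ps[k₀].2) := by
      have := firstEnum_eq_some text ps 0 k₀ hk₀ hm₀ hmin₀
      simpa using this
    rw [h1]
    -- the hits list is nonempty and its min-priority element is entry k₀
    have hmem₀ : ((k₀ : Int), ps[k₀].2) ∈ hitsOf text ps :=
      (mem_hitsOf ps hN hE text _).mpr ⟨k₀, hk₀, hm₀, rfl⟩
    obtain ⟨h₁, t, hht⟩ := List.exists_cons_of_ne_nil (List.ne_nil_of_mem hmem₀)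
    rw [hht, List.foldl_cons]
    have hstep : pickMin none h₁ = some h₁ := rfl
    rw [hstep]
    obtain ⟨r, hr, hmem, hminr⟩ := foldl_pickMin_some_spec t h₁
    rw [hr]
    have hrhits : r ∈ hitsOf text ps := by rw [hht]; exact hmem
    obtain ⟨kr, hkr, hmr, hreq⟩ := (mem_hitsOf ps hN hE text r).mp hrhits
    have hle : r.1 ≤ (k₀ : Int) := by
      have := hminr ((k₀ : Int), ps[k₀].2) (by rw [← hht]; exact hmem₀)
      simpa using this
    have hge : k₀ ≤ kr := Nat.find_min' hex ⟨hkr, hmr⟩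
    have hle' : (kr : Int) ≤ (k₀ : Int) := by rw [hreq] at hle; simpa using hle
    have hkeq : kr = k₀ := by omega
    subst hkeq
    rw [hreq]
  · have hnone : ∀ k, ∀ _ : k < ps.length, PySem.Str.isIn ps[k].1 text = false := by
      intro k hk
      by_contra hne
      exact hex ⟨k, hk, by simpa using hne⟩
    have h1 : firstEnum text ps 0 = none := by
      unfold firstEnum
      rw [List.findSome?_eq_none_iff]
      intro x hx
      obtain ⟨k, hk, rfl⟩ := (PySem.List.mem_enumerate_iff _ _ _).mp hx
      have h5 := hnone k hk
      rw [PySem.Str.isIn_eq] at h5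
      simp [h5]
    have h2 : hitsOf text ps = [] := by
      rw [List.eq_nil_iff_forall_not_mem]
      intro h hh
      obtain ⟨k, hk, hm, _⟩ := (mem_hitsOf ps hN hE text h).mp hh
      rw [hnone k hk] at hm
      exact absurd hm (by simp)
    rw [h1, h2]
    rfl

theorem firstMatch_eq_map_firstEnum (text : String) (ps : List (String × String)) (s : Int) :
    firstMatch text ps = (firstEnum text ps s).map (·.2) := by
  induction ps generalizing s with
  | nil => rfl
  | cons p t ih =>
    simp only [firstMatch, firstEnum, PySem.List.enumerate_cons, List.findSome?_cons,
      PySem.Str.isIn_eq]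
    by_cases hc : PySem.Chars.isIn p.1.toList text.toList = true
    · rw [if_pos hc, if_pos hc]; rfl
    · rw [if_neg hc, if_neg hc]
      simpa [firstMatch, firstEnum, PySem.Str.isIn_eq] using ih (s + 1)

-- A's genre loop over keys (with dict lookup) = findSome? over the pairs
theorem loopGenre_eq_firstMatch (ps : List (String × String)) (genre : String)
    (h : ∀ p ∈ ps, GENRE_MOOD.get? p.1 = some p.2) :
    loopGenre (ps.map (·.1)) genre = firstMatch genre ps := by
  induction ps with
  | nil => rfl
  | cons p rest ih =>
    simp only [List.map_cons, loopGenre, firstMatch, List.findSome?_cons,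
      h p List.mem_cons_self]
    split_ifs with hc
    · rfl
    · exact ih (fun q hq => h q (List.mem_cons_of_mem _ hq))

theorem lg (genre : String) :
    loopGenre (GENRE_PAIRS.map (·.1)) genre = firstMatch genre GENRE_PAIRS :=
  loopGenre_eq_firstMatch _ _ (by decide)

theorem loopWords_eq (ws : List String) (title mood : String) :
    loopWords ws title mood =
      (ws.map (fun w => (w, mood))).findSome?
        (fun p => if PySem.Str.isIn p.1 title then some p.2 else none) := by
  induction ws with
  | nil => rfl
  | cons w rest ih =>
    simp only [List.map_cons, loopWords, List.findSome?_cons]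
    split_ifs with hc
    · rfl
    · exact ih

theorem loopMoods_eq (items : List (String × List String)) (title : String) :
    loopMoods items title =
      firstMatch title (items.flatMap (fun p => p.2.map (fun w => (w, p.1)))) := by
  induction items with
  | nil => rfl
  | cons p rest ih =>
    simp only [loopMoods, List.flatMap_cons, firstMatch, List.findSome?_append,
      loopWords_eq p.2 title p.1]
    cases (p.2.map (fun w => (w, p.1))).findSome?
        (fun q => if PySem.Str.isIn q.1 title then some q.2 else none) with
    | some m => rfl
    | none => simpa [firstMatch] using ih

theorem keys_genre : GENRE_MOOD.keys = GENRE_PAIRS.map (·.1) := by decide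

theorem detect_eq (title genre : String) : detect_mood title genre = detect_mood_alt title genre := by
  have hg : best (PySem.Str.lower genre) GENRE_INDEX GENRE_LENS
      = firstEnum (PySem.Str.lower genre) GENRE_PAIRS 0 :=
    best_eq_firstEnum _ _ (by decide) (by decide)
  have hm : best (PySem.Str.lower title) MOOD_INDEX MOOD_LENS
      = firstEnum (PySem.Str.lower title) MOOD_PAIRS 0 :=
    best_eq_firstEnum _ _ (by decide) (by decide)
  have hmood : loopMoods MOOD_KEYWORDS (PySem.Str.lower title)
      = firstMatch (PySem.Str.lower title) MOOD_PAIRS := by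
    rw [loopMoods_eq,
      show MOOD_KEYWORDS.flatMap (fun p => p.2.map (fun w => (w, p.1))) = MOOD_PAIRS from rfl]
  simp only [detect_mood, detect_mood_alt, keys_genre, lg, hmood,
    firstMatch_eq_map_firstEnum _ _ 0, ← hg, ← hm]
  cases best (PySem.Str.lower genre) GENRE_INDEX GENRE_LENS <;>
    cases best (PySem.Str.lower title) MOOD_INDEX MOOD_LENS <;>
      simp [Option.orElse]

-- ===== VERDICT (by name: the statement is the Claim_ definition above) =====
theorem detect_mood_spec : Claim_equal_detect_mood := by
  intro title genre _
  unfold Spec_detect_mood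
  exact detect_eq title genre
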